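-- pv_equiv track=rewrite | github.com/dtelfe/Advent-of-Code | 2024/day_15.py | double_grid
-- ===== SOURCE A (Python) =====
-- def double_grid(grid):
--     double_grid = []
--
--     for row in grid:
--         double_grid.append([])
--         for value in row:
--             double_grid[-1].append(value)
--             double_grid[-1].append(value)
--
--     # Cleanse it
--     for y, row in enumerate(double_grid):
--         str_row = ''.join(row).replace("OO", "[]").replace("@@", "@.")
--         double_grid[y] = [*str_row]
--
--     return double_grid
-- ===== SOURCE B (Python) =====
-- def double_grid(grid):
--     # Single pass per row: flatten each cell doubled into characters, then one
--     # left-to-right scan rewriting "OO" -> "[]" and "@@" -> "@." in place.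
--     out = []
--     for row in grid:
--         chars = [c for v in row for c in v + v]
--         new_row = []
--         i = 0
--         n = len(chars)
--         while i < n:
--             if chars[i:i + 2] == ["O", "O"]:
--                 new_row += ["[", "]"]
--                 i += 2
--             elif chars[i:i + 2] == ["@", "@"]:
--                 new_row += ["@", "."]
--                 i += 2
--             else:
--                 new_row.append(chars[i])
--                 i += 1
--         out.append(new_row)
--     return out
-- ===== Notes on version B (the rewrite author's own statement) =====
-- stated objective: alternative
-- what changed: A builds the doubled row, joins it into a string, runs two sequential str.replace passes (OO->[], @@->@.) and re-splits into characters; B never joins: it flattens each doubled cell into characters and rewrites OO and @@ in a single left-to-right two-character scan per row.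
import Mathlib
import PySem

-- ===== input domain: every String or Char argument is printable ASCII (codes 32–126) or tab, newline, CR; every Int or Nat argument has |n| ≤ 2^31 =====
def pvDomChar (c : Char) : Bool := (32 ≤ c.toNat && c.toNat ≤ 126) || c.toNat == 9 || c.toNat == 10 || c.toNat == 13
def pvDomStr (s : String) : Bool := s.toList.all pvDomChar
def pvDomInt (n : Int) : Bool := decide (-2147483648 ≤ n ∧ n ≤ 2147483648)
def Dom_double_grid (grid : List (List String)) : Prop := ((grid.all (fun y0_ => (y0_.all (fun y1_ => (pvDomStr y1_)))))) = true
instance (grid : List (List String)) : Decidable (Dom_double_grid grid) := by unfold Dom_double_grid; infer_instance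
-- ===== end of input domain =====

-- B replaces A's two textual-replace passes (join, replace "OO", replace "@@", re-split)
-- with one left-to-right two-character scan over the doubled row; objective: alternative.

-- ===== PORT A =====
-- phase 1: append each value twice into the new row
def doubleRowA (row : List String) : List String :=
  row.foldl (fun r v => r ++ [v, v]) []

-- phase 2 ("cleanse"): join, replace "OO"→"[]", then "@@"→"@.", split into chars
def cleanseRowA (row : List String) : List String :=
  (PySem.Str.replace (PySem.Str.replace (PySem.Str.join "" row) "OO" "[]") "@@" "@.").toList.map
    (fun c => String.mk [c])

def double_grid (grid : List (List String)) : List (List String) :=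
  (grid.foldl (fun dg row => dg ++ [doubleRowA row]) []).map cleanseRowA

-- ===== PORT B =====
-- B's while loop: scan the char list, rewriting "OO"→"[]" and "@@"→"@." in one pass
def scanB : List Char → List Char
  | [] => []
  | [c] => [c]
  | c1 :: c2 :: t =>
    if c1 = 'O' ∧ c2 = 'O' then '[' :: ']' :: scanB t
    else if c1 = '@' ∧ c2 = '@' then '@' :: '.' :: scanB t
    else c1 :: scanB (c2 :: t)

def double_grid_alt (grid : List (List String)) : List (List String) :=
  grid.map (fun row =>
    (scanB (row.flatMap (fun v => v.toList ++ v.toList))).map (fun c => String.mk [c]))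

-- ===== PRECONDITION & SPEC =====
def Spec_double_grid (grid : List (List String)) (out : List (List String)) : Prop := out = double_grid_alt grid
instance (grid : List (List String)) (out : List (List String)) : Decidable (Spec_double_grid grid out) := by unfold Spec_double_grid; infer_instance

-- ===== CLAIM (what is proved, stated in full; the proofs are below) =====
def Claim_equal_double_grid : Prop := ∀ (grid : List (List String)), Dom_double_grid grid → Spec_double_grid grid (double_grid grid)

-- ===== LEMMAS AND PROOFS =====

-- structural form of Python replace with a two-character pattern
def rep2 (a b : Char) (new : List Char) : List Char → List Char
  | [] => []
  | [c] => [c]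
  | c1 :: c2 :: t =>
    if c1 = a ∧ c2 = b then new ++ rep2 a b new t
    else c1 :: rep2 a b new (c2 :: t)

theorem rep2_cons_ne (a b : Char) (new : List Char) (c : Char) (t : List Char) (h : c ≠ a) :
    rep2 a b new (c :: t) = c :: rep2 a b new t := by
  cases t with
  | nil => simp [rep2]
  | cons d t' => simp [rep2, h]

theorem go_eq_rep2 (a b : Char) (new : List Char) (fuel : Nat) :
    ∀ (l acc : List Char), l.length ≤ fuel →
      PySem.Chars.replace.go [a, b] new fuel l acc = acc.reverse ++ rep2 a b new l := by
  induction fuel with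
  | zero =>
    intro l acc h
    have : l = [] := List.length_eq_zero_iff.mp (Nat.le_zero.mp h)
    subst this
    simp [PySem.Chars.replace.go, rep2]
  | succ fuel ih =>
    intro l acc h
    cases l with
    | nil => simp [PySem.Chars.replace.go, rep2]
    | cons c t =>
      rw [PySem.Chars.replace.go]
      cases t with
      | nil =>
        rw [if_neg (by simp [List.isPrefixOf])]
        rw [ih _ _ (by simp)]
        simp [rep2]
      | cons d t' =>
        by_cases hp : c = a ∧ d = b
        · obtain ⟨rfl, rfl⟩ := hp
          rw [if_pos (by simp [List.isPrefixOf])]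
          rw [ih _ _ (by simp at h ⊢; omega)]
          simp [rep2]
        · rw [if_neg (by simp [List.isPrefixOf]; intro h1 h2; exact hp ⟨h1.symm, h2.symm⟩)]
          rw [ih _ _ (by simp at h ⊢; omega)]
          rw [show rep2 a b new (c :: d :: t') = c :: rep2 a b new (d :: t') by simp [rep2, hp]]
          simp

theorem replace_eq_rep2 (a b : Char) (new s : List Char) :
    PySem.Chars.replace s [a, b] new = rep2 a b new s := by
  rw [PySem.Chars.replace]
  simp [go_eq_rep2 a b new s.length s [] (le_refl _)]

-- after '@' with a non-'@' next cell, rep2 '@' '@' commutes with the cons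
theorem repAt_cons_repO (c : Char) (t : List Char) (hc : c ≠ '@') :
    rep2 '@' '@' ['@', '.'] ('@' :: rep2 'O' 'O' ['[', ']'] (c :: t)) =
      '@' :: rep2 '@' '@' ['@', '.'] (rep2 'O' 'O' ['[', ']'] (c :: t)) := by
  cases t with
  | nil => simp [rep2, hc]
  | cons d t' =>
    by_cases h : c = 'O' ∧ d = 'O'
    · obtain ⟨rfl, rfl⟩ := h
      simp [rep2]
    · simp [rep2, h, hc]

-- the single scan equals the two sequential replaces
theorem scanB_eq (cs : List Char) :
    scanB cs = rep2 '@' '@' ['@', '.'] (rep2 'O' 'O' ['[', ']'] cs) := by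
  induction cs using scanB.induct with
  | case1 => simp [scanB, rep2]
  | case2 c => simp [scanB, rep2]
  | case3 c1 c2 t h ih =>
    obtain ⟨rfl, rfl⟩ := h
    rw [scanB, if_pos ⟨rfl, rfl⟩]
    rw [show rep2 'O' 'O' ['[', ']'] ('O' :: 'O' :: t) = '[' :: ']' :: rep2 'O' 'O' ['[', ']'] t by
      simp [rep2]]
    rw [rep2_cons_ne _ _ _ _ _ (by decide), rep2_cons_ne _ _ _ _ _ (by decide), ih]
  | case4 c1 c2 t h1 h2 ih =>
    obtain ⟨rfl, rfl⟩ := h2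
    rw [scanB, if_neg h1, if_pos ⟨rfl, rfl⟩]
    rw [rep2_cons_ne 'O' 'O' ['[', ']'] '@' _ (by decide),
        rep2_cons_ne 'O' 'O' ['[', ']'] '@' _ (by decide)]
    rw [show rep2 '@' '@' ['@', '.'] ('@' :: '@' :: rep2 'O' 'O' ['[', ']'] t) =
        '@' :: '.' :: rep2 '@' '@' ['@', '.'] (rep2 'O' 'O' ['[', ']'] t) by simp [rep2]]
    rw [ih]
  | case5 c1 c2 t h1 h2 ih =>
    rw [scanB, if_neg h1, if_neg h2, ih]
    by_cases hO : c1 = 'O'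
    · subst hO
      have hc2 : c2 ≠ 'O' := fun h => h1 ⟨rfl, h⟩
      rw [show rep2 'O' 'O' ['[', ']'] ('O' :: c2 :: t) = 'O' :: rep2 'O' 'O' ['[', ']'] (c2 :: t) by
        simp [rep2, hc2]]
      rw [rep2_cons_ne '@' '@' ['@', '.'] 'O' _ (by decide)]
    · rw [rep2_cons_ne 'O' 'O' ['[', ']'] c1 _ hO]
      by_cases hA : c1 = '@'
      · subst hA
        have hc2 : c2 ≠ '@' := fun h => h2 ⟨rfl, h⟩
        rw [repAt_cons_repO c2 t hc2]
      · rw [rep2_cons_ne '@' '@' ['@', '.'] c1 _ hA]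

-- flatten ignores empty-separator intersperse
theorem flatten_intersperse_nil {α : Type} (l : List (List α)) :
    (List.intersperse ([] : List α) l).flatten = l.flatten := by
  induction l with
  | nil => rfl
  | cons a t ih =>
    cases t with
    | nil => rfl
    | cons b t' => simpa [List.intersperse] using ih

-- A's phase-1 foldl builds the flat doubled row
theorem doubleRowA_eq (row : List String) :
    doubleRowA row = row.flatMap (fun v => [v, v]) := by
  unfold doubleRowA
  rw [PySem.List.foldl_append_eq_flatMap]
  rfl

-- the joined doubled row, as characters
theorem join_doubleRowA (row : List String) :
    (PySem.Str.join "" (doubleRowA row)).toList = row.flatMap (fun v => v.toList ++ v.toList) := by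
  rw [doubleRowA_eq]
  rw [show PySem.Str.join = fun sep parts =>
    String.ofList (PySem.Chars.join sep.toList (List.map String.toList parts)) from rfl]
  simp only [PySem.Chars.join, List.intercalate]
  rw [show ("" : String).toList = [] from rfl, flatten_intersperse_nil]
  induction row with
  | nil => rfl
  | cons v t ih => simp_all

theorem flatMap_singleton_map {α β : Type} (f : α → β) (l : List α) :
    l.flatMap (fun x => [f x]) = l.map f := by
  induction l with
  | nil => rfl
  | cons a t ih => simp_all

-- per-row equality of the two cleanses
theorem row_eq (row : List String) :
    cleanseRowA (doubleRowA row) =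
      (scanB (row.flatMap (fun v => v.toList ++ v.toList))).map (fun c => String.mk [c]) := by
  unfold cleanseRowA
  rw [scanB_eq]
  have h1 : (PySem.Str.replace (PySem.Str.replace (PySem.Str.join "" (doubleRowA row)) "OO" "[]")
      "@@" "@.").toList =
      rep2 '@' '@' ['@', '.'] (rep2 'O' 'O' ['[', ']']
        (row.flatMap (fun v => v.toList ++ v.toList))) := by
    rw [PySem.Str.toList_replace, PySem.Str.toList_replace]
    rw [show ("OO" : String).toList = ['O', 'O'] from rfl]
    rw [show ("[]" : String).toList = ['[', ']'] from rfl]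
    rw [show ("@@" : String).toList = ['@', '@'] from rfl]
    rw [show ("@." : String).toList = ['@', '.'] from rfl]
    rw [replace_eq_rep2, replace_eq_rep2, join_doubleRowA]
  rw [h1]

theorem maps_eq (g : List (List String)) :
    List.map cleanseRowA (List.map doubleRowA g) =
      List.map (fun row =>
        (scanB (row.flatMap (fun v => v.toList ++ v.toList))).map (fun c => String.mk [c])) g := by
  induction g with
  | nil => simp only [List.map_nil]
  | cons r t ih =>
    simp only [List.map_cons]
    rw [row_eq r, ih]

-- ===== VERDICT (by name: the statement is the Claim_ definition above) =====
theorem double_grid_spec : Claim_equal_double_grid := by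
  intro grid hd
  unfold Spec_double_grid double_grid double_grid_alt
  rw [PySem.List.foldl_append_eq_flatMap (fun row => [doubleRowA row]) grid []]
  rw [List.nil_append]
  rw [flatMap_singleton_map doubleRowA grid]
  exact maps_eq grid
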